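-- pv_equiv track=rewrite | github.com/HananAlradadi/coder-hub-python-challenges | countDown.py | countdown
-- ===== SOURCE A (Python) =====
-- from typing import List
--
-- def countdown(num: int) -> List[int]:
--     # write your code here ^_^
--     if num <= 3 :
--         return [0]
--     arr = []
--     while num > 3 :
--         num = num - 3
--         if num % 2 == 0 :
--             arr.insert(0,num)
--     return arr
-- ===== SOURCE B (Python) =====
-- def countdown(num):
--     if num <= 3:
--         return [0]
--     r = num % 3
--     start = 6 if r == 0 else (4 if r == 1 else 2)
--     return list(range(start, num, 6))
-- ===== Notes on version B (the rewrite author's own statement) =====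
-- stated objective: faster
-- what changed: Replaced the decrement-by-3 prepend-filter loop with one closed-form arithmetic progression: the kept values are exactly range(start, num, 6) where start is the even residue determined by num mod 3.
import Mathlib
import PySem

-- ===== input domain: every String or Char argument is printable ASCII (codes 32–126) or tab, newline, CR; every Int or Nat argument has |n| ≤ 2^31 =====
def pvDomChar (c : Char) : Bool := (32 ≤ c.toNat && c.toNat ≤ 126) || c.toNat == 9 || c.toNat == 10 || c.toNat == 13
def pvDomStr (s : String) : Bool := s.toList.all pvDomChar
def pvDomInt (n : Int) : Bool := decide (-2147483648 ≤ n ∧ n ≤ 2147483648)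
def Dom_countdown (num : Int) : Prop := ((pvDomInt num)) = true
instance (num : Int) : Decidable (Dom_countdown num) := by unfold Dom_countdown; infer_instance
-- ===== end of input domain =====

-- B replaces A's decrement-by-3 filter loop with a closed-form range(start, num, 6); objective: simpler.

-- ===== PORT A =====
-- while num > 3: num -= 3; if num % 2 == 0: arr.insert(0, num)
def countdownLoop (num : Int) (arr : List Int) : List Int :=
  if _h : num > 3 then
    let n := num - 3
    countdownLoop n (if PySem.Int.mod n 2 = 0 then PySem.List.insert arr 0 n else arr)
  else arr
termination_by num.toNat
decreasing_by omega

def countdown (num : Int) : List Int :=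
  if num ≤ 3 then [0]
  else countdownLoop num []

-- ===== PORT B =====
def countdown_alt (num : Int) : List Int :=
  if num ≤ 3 then [0]
  else
    let r := PySem.Int.mod num 3
    let start : Int := if r = 0 then 6 else if r = 1 then 4 else 2
    PySem.List.pyRange start num 6

-- ===== PRECONDITION & SPEC =====
def Spec_countdown (num : Int) (out : List Int) : Prop := out = countdown_alt num
instance (num : Int) (out : List Int) : Decidable (Spec_countdown num out) := by unfold Spec_countdown; infer_instance

-- ===== CLAIM (what is proved, stated in full; the proofs are below) =====
def Claim_equal_countdown : Prop := ∀ (num : Int), Dom_countdown num → Spec_countdown num (countdown num)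

-- ===== LEMMAS AND PROOFS =====

-- the even start of the step-6 progression determined by num's residue mod 3
def pvStart (num : Int) : Int :=
  if PySem.Int.mod num 3 = 0 then 6 else if PySem.Int.mod num 3 = 1 then 4 else 2

lemma pvStart_sub_three (num : Int) : pvStart (num - 3) = pvStart num := by
  unfold pvStart
  have h1 : PySem.Int.mod (num - 3) 3 = PySem.Int.mod num 3 := by
    rw [PySem.Int.mod_eq_emod_of_pos (by norm_num), PySem.Int.mod_eq_emod_of_pos (by norm_num)]
    omega
  rw [h1]

lemma pvStart_props (num : Int) :
    (pvStart num = 2 ∨ pvStart num = 4 ∨ pvStart num = 6) ∧ (3 ∣ (num - pvStart num)) := by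
  unfold pvStart
  have h0 := PySem.Int.mod_eq_emod_of_pos (a := num) (b := 3) (by norm_num)
  have h1 : num % 3 = 0 ∨ num % 3 = 1 ∨ num % 3 = 2 := by omega
  split_ifs with ha hb <;> rw [h0] at * <;> constructor <;> try tauto
  · omega
  · omega
  · omega

-- one step of the progression: raising the bound by 3 appends the new value iff it is even
lemma range6_step (s m : Int) (hs : s = 2 ∨ s = 4 ∨ s = 6) (hm : 0 < m) (hc : 3 ∣ (m - s)) :
    PySem.List.pyRange s (m + 3) 6 =
      PySem.List.pyRange s m 6 ++ (if PySem.Int.mod m 2 = 0 then [m] else []) := by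
  have hmod := PySem.Int.mod_eq_emod_of_pos (a := m) (b := 2) (by norm_num)
  rw [PySem.List.pyRange_of_pos _ _ (by norm_num), PySem.List.pyRange_of_pos _ _ (by norm_num)]
  by_cases he : PySem.Int.mod m 2 = 0
  · -- m even: m ≡ s (mod 6), m ≥ s; count goes up by one and the new last element is m
    have h6 : 6 ∣ (m - s) := by omega
    have hms : s ≤ m := by omega
    have hcount : (if s < m + 3 then ((m + 3 - s + 6 - 1) / 6).toNat else 0)
        = (if s < m then ((m - s + 6 - 1) / 6).toNat else 0) + 1 := by
      split_ifs <;> omega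
    rw [hcount, List.range_succ, List.map_append, if_pos he]
    congr 1
    simp only [List.map_cons, List.map_nil, List.cons.injEq, and_true]
    split_ifs with h <;> omega
  · -- m odd: m ≡ s+3 (mod 6); the count is unchanged
    have hcount : (if s < m + 3 then ((m + 3 - s + 6 - 1) / 6).toNat else 0)
        = (if s < m then ((m - s + 6 - 1) / 6).toNat else 0) := by
      split_ifs <;> omega
    rw [hcount, if_neg he, List.append_nil]

lemma range6_nil (num : Int) (h : num ≤ 3) : PySem.List.pyRange (pvStart num) num 6 = [] := by
  obtain ⟨hs, hd⟩ := pvStart_props num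
  rw [PySem.List.pyRange_of_pos _ _ (by norm_num)]
  have : ¬ (pvStart num < num) := by omega
  simp [this]

lemma loop_eq (num : Int) (arr : List Int) :
    countdownLoop num arr = PySem.List.pyRange (pvStart num) num 6 ++ arr := by
  induction num, arr using countdownLoop.induct with
  | case1 num arr h n ih =>
    simp only [dite_eq_ite] at ih
    rw [countdownLoop, dif_pos h]
    show countdownLoop n (if PySem.Int.mod n 2 = 0 then PySem.List.insert arr 0 n else arr) =
      PySem.List.pyRange (pvStart num) num 6 ++ arr
    rw [ih]
    have hn : n = num - 3 := rfl
    rw [hn, pvStart_sub_three]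
    obtain ⟨hs, hd⟩ := pvStart_props (num - 3)
    rw [pvStart_sub_three] at hs hd
    have hstep := range6_step (pvStart num) (num - 3) hs (by omega) hd
    rw [show num - 3 + 3 = num by ring] at hstep
    rw [hstep, List.append_assoc]
    congr 1
    split_ifs with he
    · rw [PySem.List.insert_zero]; rfl
    · rfl
  | case2 num arr h =>
    rw [countdownLoop, dif_neg h, range6_nil num (by omega)]
    rfl

-- ===== VERDICT (by name: the statement is the Claim_ definition above) =====
theorem countdown_spec : Claim_equal_countdown := by
  intro num _
  unfold Spec_countdown countdown countdown_alt
  split_ifs with h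
  · rfl
  · rw [loop_eq num []]
    simp [pvStart]
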